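-- pv_equiv track=rewrite | github.com/pypi-data/pypi-mirror-337 | packages/codebeaver/codebeaver-0.1.4b0-py3-none-any.whl/codebeaver/ContentCleaner.py | clean_typescript
-- ===== SOURCE A (Python) =====
-- def clean_typescript(content: str) -> str:
--     lines = content.splitlines()
--     import_buffer = []
--     import_blocks = {}  # Dict to store sets of imports per module
--     type_import_blocks = {}  # Dict to store sets of type imports per module
--     other_lines = []
--     in_multiline_import = False
--
--     def parse_imports(import_text: str) -> set[str]:
--         start = import_text.find("{")
--         end = import_text.rfind("}")
--         if start == -1 or end == -1:
--             return set()
--         items = import_text[start + 1 : end]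
--         return {item.strip() for item in items.split(",") if item.strip()}
--
--     lines = [line.strip("\ufeff").rstrip("\r\n") for line in lines]
--
--     for line in lines:
--         stripped_line = line.strip()
--         if stripped_line.startswith("import "):
--             is_type_import = "type {" in line
--             target_blocks = type_import_blocks if is_type_import else import_blocks
--
--             if "{" in line and "}" not in line:
--                 in_multiline_import = True
--                 import_buffer = [line]
--             else:
--                 module_path = line.split("from ")[-1].strip("'; ")
--                 current_imports = parse_imports(line)
--                 if module_path in target_blocks:
--                     target_blocks[module_path].update(current_imports)
--                 else:
--                     target_blocks[module_path] = current_imports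
--         elif in_multiline_import:
--             import_buffer.append(line)
--             if "}" in line:
--                 in_multiline_import = False
--                 full_import = "\n".join(import_buffer)
--                 is_type_import = "type {" in full_import
--                 target_blocks = (
--                     type_import_blocks if is_type_import else import_blocks
--                 )
--                 module_path = full_import.split("from ")[-1].strip("'; ")
--                 current_imports = parse_imports(full_import)
--                 if module_path in target_blocks:
--                     target_blocks[module_path].update(current_imports)
--                 else:
--                     target_blocks[module_path] = current_imports
--                 import_buffer = []
--         elif stripped_line:
--             other_lines.append(line)
--
--     final_content = []
--
--     # Regular imports first
--     for module_path in sorted(import_blocks.keys()):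
--         items = sorted(import_blocks[module_path])
--         if len(items) == 1:
--             final_content.append(f"import {{ {items[0]} }} from '{module_path}';")
--         elif items:
--             final_content.extend(
--                 [
--                     "import {",
--                     *[f"    {item}," for item in items[:-1]],
--                     f"    {items[-1]}",
--                     f"}} from '{module_path}';",
--                 ]
--             )
--
--     # Type imports second
--     for module_path in sorted(type_import_blocks.keys()):
--         items = sorted(type_import_blocks[module_path])
--         if len(items) == 1:
--             final_content.append(
--                 f"import type {{ {items[0]} }} from '{module_path}';"
--             )
--         elif items:
--             final_content.extend(
--                 [
--                     "import type {",
--                     *[f"    {item}," for item in items[:-1]],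
--                     f"    {items[-1]}",
--                     f"}} from '{module_path}';",
--                 ]
--             )
--
--     final_content.append("")
--     final_content.extend(other_lines)
--     return "\n".join(final_content).strip()
-- ===== SOURCE B (Python) =====
-- def clean_typescript(content: str) -> str:
--     lines = [line.strip("\ufeff").rstrip("\r\n") for line in content.splitlines()]
--
--     # Pass 1: fold physical lines into complete logical import statements.
--     statements = []
--     other_lines = []
--     buffer = None  # None = not inside a multiline import
--     for line in lines:
--         if line.strip().startswith("import "):
--             if "{" in line and "}" not in line:
--                 buffer = [line]
--             else:
--                 statements.append(line)
--         elif buffer is not None: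
--             buffer.append(line)
--             if "}" in line:
--                 statements.append("\n".join(buffer))
--                 buffer = None
--         elif line.strip():
--             other_lines.append(line)
--     # an unterminated buffer is silently dropped, as in the original
--
--     def module_of(stmt):
--         return stmt.split("from ")[-1].strip("'; ")
--
--     def items_of(stmt):
--         start, end = stmt.find("{"), stmt.rfind("}")
--         if start == -1 or end == -1:
--             return set()
--         return {it.strip() for it in stmt[start + 1 : end].split(",") if it.strip()}
--
--     # Dict-free grouping: sorted distinct modules, each with the sorted union of its items.
--     def group(stmts):
--         pairs = [(module_of(s), items_of(s)) for s in stmts]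
--         return [(m, sorted({it for m2, its in pairs if m2 == m for it in its}))
--                 for m in sorted({m for m, _ in pairs})]
--
--     # Each import block is rendered as ONE (possibly multi-line) string.
--     def render(prefix, module, items):
--         if not items:
--             return []
--         if len(items) == 1:
--             return [prefix + " { " + items[0] + " } from '" + module + "';"]
--         return [prefix + " {\n    " + ",\n    ".join(items) + "\n} from '" + module + "';"]
--
--     blocks = []
--     for m, items in group([s for s in statements if "type {" not in s]):
--         blocks += render("import", m, items)
--     for m, items in group([s for s in statements if "type {" in s]):
--         blocks += render("import type", m, items)
--     return "\n".join(blocks + [""] + other_lines).strip()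
-- ===== Notes on version B (the rewrite author's own statement) =====
-- stated objective: alternative
-- what changed: A's single interleaved state machine with two mutable dicts-of-sets and two duplicated line-by-line formatting loops is replaced by: a line-folding pass into logical statements, dict-free grouping (sorted distinct modules, each paired with the sorted union of its items, via comprehensions over a pair list), and rendering each import block as one multi-line string instead of a list of lines.
import Mathlib
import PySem

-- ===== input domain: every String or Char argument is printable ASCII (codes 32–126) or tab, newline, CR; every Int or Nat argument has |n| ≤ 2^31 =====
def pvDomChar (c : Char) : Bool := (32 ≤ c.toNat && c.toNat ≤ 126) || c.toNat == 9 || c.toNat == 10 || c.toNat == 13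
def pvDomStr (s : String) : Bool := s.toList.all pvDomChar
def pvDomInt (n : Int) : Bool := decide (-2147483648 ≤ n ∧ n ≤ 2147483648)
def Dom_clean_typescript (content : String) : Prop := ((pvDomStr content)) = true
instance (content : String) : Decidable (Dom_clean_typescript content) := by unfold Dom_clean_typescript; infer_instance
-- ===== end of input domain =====

-- B replaces A's single interleaved state machine (two mutable dicts-of-sets and two duplicated
-- line-emitting loops) by staged passes: fold physical lines into logical statements, group them
-- dict-free (sorted distinct modules, each with the sorted union of its items), and render each
-- import block as one multi-line string; same output, different decomposition.


-- ===== PORT A =====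
-- line.rstrip("\r\n"): rstrip with an explicit char set has no PySem primitive; ported by
-- hand (exact: drops trailing '\r'/'\n' characters).
def pvRstripCRLF (s : String) : String :=
  String.ofList ((s.toList.reverse.dropWhile (fun c => c == '\r' || c == '\n')).reverse)

-- A's nested helper parse_imports
def pvParseImports (t : String) : PySem.Set String :=
  let start := PySem.Str.find t "{"
  let e := PySem.Str.rfind t "}"
  if start = -1 ∨ e = -1 then PySem.Set.empty
  else
    let items := PySem.Str.slice t (some (start + 1)) (some e)
    PySem.Set.ofList
      ((((PySem.Str.split? items ",").getD []).filter
          (fun item => PySem.Str.strip item != "")).map PySem.Str.strip)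

-- A's loop body: state = (import_buffer, import_blocks, type_import_blocks, other_lines, in_multiline_import)
def pvStepA
    (st : List String × PySem.Dict String (PySem.Set String) ×
          PySem.Dict String (PySem.Set String) × List String × Bool)
    (line : String) :
    List String × PySem.Dict String (PySem.Set String) ×
    PySem.Dict String (PySem.Set String) × List String × Bool :=
  let (buf, reg, typ, others, inML) := st
  let stripped := PySem.Str.strip line
  if PySem.Str.startswith stripped "import " then
    let isType := PySem.Str.isIn "type {" line
    if PySem.Str.isIn "{" line && !(PySem.Str.isIn "}" line) then
      ([line], reg, typ, others, true)
    else
      let mp := PySem.Str.stripChars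
        ((PySem.List.pyGet? ((PySem.Str.split? line "from ").getD []) (-1)).getD "") "'; "
      let cur := pvParseImports line
      if isType then
        (buf, reg,
          (if typ.contains mp then typ.insert mp (PySem.Set.update (typ.getD mp PySem.Set.empty) cur)
           else typ.insert mp cur), others, inML)
      else
        (buf,
          (if reg.contains mp then reg.insert mp (PySem.Set.update (reg.getD mp PySem.Set.empty) cur)
           else reg.insert mp cur), typ, others, inML)
  else if inML then
    let buf2 := buf ++ [line]
    if PySem.Str.isIn "}" line then
      let full := PySem.Str.join "\n" buf2
      let isType := PySem.Str.isIn "type {" full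
      let mp := PySem.Str.stripChars
        ((PySem.List.pyGet? ((PySem.Str.split? full "from ").getD []) (-1)).getD "") "'; "
      let cur := pvParseImports full
      if isType then
        ([], reg,
          (if typ.contains mp then typ.insert mp (PySem.Set.update (typ.getD mp PySem.Set.empty) cur)
           else typ.insert mp cur), others, false)
      else
        ([],
          (if reg.contains mp then reg.insert mp (PySem.Set.update (reg.getD mp PySem.Set.empty) cur)
           else reg.insert mp cur), typ, others, false)
    else (buf2, reg, typ, others, inML)
  else if stripped ≠ "" then (buf, reg, typ, others ++ [line], inML)
  else (buf, reg, typ, others, inML)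

def clean_typescript (content : String) : String :=
  let lines := (PySem.Str.splitlines content).map
    (fun line => pvRstripCRLF (PySem.Str.stripChars line "\ufeff"))
  let st := lines.foldl pvStepA ([], PySem.Dict.empty, PySem.Dict.empty, [], false)
  let reg := st.2.1
  let typ := st.2.2.1
  let others := st.2.2.2.1
  -- regular imports first
  let fc1 := (PySem.List.sorted reg.keys (fun x => x)).foldl (fun acc mp =>
      let items := PySem.List.sorted (reg.getD mp PySem.Set.empty) (fun x => x)
      if items.length = 1 then
        acc ++ ["import { " ++ (PySem.List.pyGet? items 0).getD "" ++ " } from '" ++ mp ++ "';"]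
      else if items ≠ [] then
        acc ++ (["import {"]
          ++ (PySem.List.slice items none (some (-1))).map (fun item => "    " ++ item ++ ",")
          ++ ["    " ++ (PySem.List.pyGet? items (-1)).getD ""]
          ++ ["} from '" ++ mp ++ "';"])
      else acc) []
  -- type imports second
  let fc2 := (PySem.List.sorted typ.keys (fun x => x)).foldl (fun acc mp =>
      let items := PySem.List.sorted (typ.getD mp PySem.Set.empty) (fun x => x)
      if items.length = 1 then
        acc ++ ["import type { " ++ (PySem.List.pyGet? items 0).getD "" ++ " } from '" ++ mp ++ "';"]
      else if items ≠ [] then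
        acc ++ (["import type {"]
          ++ (PySem.List.slice items none (some (-1))).map (fun item => "    " ++ item ++ ",")
          ++ ["    " ++ (PySem.List.pyGet? items (-1)).getD ""]
          ++ ["} from '" ++ mp ++ "';"])
      else acc) fc1
  PySem.Str.strip (PySem.Str.join "\n" (fc2 ++ [""] ++ others))

-- ===== PORT B =====
-- pass 1 body: state = (buffer : Option, statements, other_lines)
def pvPass1Step (st : Option (List String) × List String × List String) (line : String) :
    Option (List String) × List String × List String :=
  let (bufo, stmts, others) := st
  if PySem.Str.startswith (PySem.Str.strip line) "import " then
    if PySem.Str.isIn "{" line && !(PySem.Str.isIn "}" line) then (some [line], stmts, others)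
    else (bufo, stmts ++ [line], others)
  else
    match bufo with
    | some buf =>
        if PySem.Str.isIn "}" line then
          (none, stmts ++ [PySem.Str.join "\n" (buf ++ [line])], others)
        else (some (buf ++ [line]), stmts, others)
    | none =>
        if PySem.Str.strip line ≠ "" then (none, stmts, others ++ [line])
        else (none, stmts, others)

def pvModuleOf (stmt : String) : String :=
  PySem.Str.stripChars
    ((PySem.List.pyGet? ((PySem.Str.split? stmt "from ").getD []) (-1)).getD "") "'; "

def pvItemsOf (stmt : String) : PySem.Set String :=
  let start := PySem.Str.find stmt "{"
  let e := PySem.Str.rfind stmt "}"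
  if start = -1 ∨ e = -1 then PySem.Set.empty
  else
    PySem.Set.ofList
      ((((PySem.Str.split? (PySem.Str.slice stmt (some (start + 1)) (some e)) ",").getD []).filter
          (fun it => PySem.Str.strip it != "")).map PySem.Str.strip)

-- dict-free grouping: sorted distinct modules, each with the sorted union of its items
def pvGroup (stmts : List String) : List (String × List String) :=
  let pairs := stmts.map (fun s => (pvModuleOf s, pvItemsOf s))
  (PySem.List.sorted (PySem.Set.ofList (pairs.map Prod.fst)) (fun x => x)).map
    (fun m => (m, PySem.List.sorted
      (PySem.Set.ofList ((pairs.filter (fun p => p.1 == m)).flatMap Prod.snd)) (fun x => x)))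

-- one import block rendered as a single (possibly multi-line) string
def pvRender (pfx mp : String) (items : List String) : List String :=
  if items = [] then []
  else if items.length = 1 then
    [pfx ++ " { " ++ (PySem.List.pyGet? items 0).getD "" ++ " } from '" ++ mp ++ "';"]
  else [pfx ++ " {\n    " ++ PySem.Str.join ",\n    " items ++ "\n} from '" ++ mp ++ "';"]

def clean_typescript_alt (content : String) : String :=
  let lines := (PySem.Str.splitlines content).map
    (fun line => pvRstripCRLF (PySem.Str.stripChars line "\ufeff"))
  let st := lines.foldl pvPass1Step (none, [], [])
  let stmts := st.2.1
  let others := st.2.2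
  let blocks :=
    (pvGroup (stmts.filter (fun s => !PySem.Str.isIn "type {" s))).flatMap
      (fun p => pvRender "import" p.1 p.2)
    ++ (pvGroup (stmts.filter (fun s => PySem.Str.isIn "type {" s))).flatMap
      (fun p => pvRender "import type" p.1 p.2)
  PySem.Str.strip (PySem.Str.join "\n" (blocks ++ [""] ++ others))

-- ===== PRECONDITION & SPEC =====
def Spec_clean_typescript (content : String) (out : String) : Prop := out = clean_typescript_alt content
instance (content : String) (out : String) : Decidable (Spec_clean_typescript content out) := by unfold Spec_clean_typescript; infer_instance

-- ===== CLAIM (what is proved, stated in full; the proofs are below) =====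
def Claim_equal_clean_typescript : Prop := ∀ (content : String), Dom_clean_typescript content → Spec_clean_typescript content (clean_typescript content)

-- ===== LEMMAS AND PROOFS =====

-- ---- string-join facts ----
theorem pvJoinOne (sep x : String) : PySem.Str.join sep [x] = x := by
  apply String.toList_inj.mp
  simp [PySem.Str.join, PySem.Chars.join_singleton]

theorem pvJoinTwo (sep x y : String) (r : List String) :
    PySem.Str.join sep (x :: y :: r) = x ++ sep ++ PySem.Str.join sep (y :: r) := by
  apply String.toList_inj.mp
  simp [PySem.Str.join, String.toList_append, PySem.Chars.join_cons_cons]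

theorem pvJoinApp (sep : String) (xs ys : List String) (hx : xs ≠ []) (hy : ys ≠ []) :
    PySem.Str.join sep (xs ++ ys) = PySem.Str.join sep xs ++ sep ++ PySem.Str.join sep ys := by
  induction xs with
  | nil => simp at hx
  | cons a t ih =>
    cases t with
    | nil =>
      cases ys with
      | nil => simp at hy
      | cons b u => simp [pvJoinTwo, pvJoinOne]
    | cons b u =>
      simp only [List.cons_append]
      rw [pvJoinTwo]
      have := ih (by simp)
      simp only [List.cons_append] at this
      rw [this]
      simp [pvJoinTwo, String.append_assoc]

theorem pvJoinConsNe (sep x : String) (rest : List String) (h : rest ≠ []) :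
    PySem.Str.join sep (x :: rest) = x ++ sep ++ PySem.Str.join sep rest := by
  have := pvJoinApp sep [x] rest (by simp) h
  simpa [pvJoinOne] using this

-- join "\n" of A's indented middle lines is "    " ++ the comma-join of the items
theorem pvLemJ (items : List String) (h : items ≠ []) :
    PySem.Str.join "\n" ((PySem.List.slice items none (some (-1))).map (fun it => "    " ++ it ++ ",")
      ++ ["    " ++ (PySem.List.pyGet? items (-1)).getD ""])
      = "    " ++ PySem.Str.join ",\n    " items := by
  induction items with
  | nil => simp at h
  | cons a t ih =>
    cases t with
    | nil =>
      simp [PySem.List.slice_to_neg_one, PySem.List.pyGet?_neg_one, pvJoinOne]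
    | cons b u =>
      have ht : b :: u ≠ [] := by simp
      rw [PySem.List.slice_to_neg_one, PySem.List.pyGet?_neg_one] at *
      have hd : (a :: b :: u).dropLast = a :: (b :: u).dropLast := by simp
      have hl : (a :: b :: u).getLast? = (b :: u).getLast? := by
        simp [List.getLast?_cons_cons]
      have hrest : (List.map (fun it => "    " ++ it ++ ",") (b :: u).dropLast
          ++ ["    " ++ (b :: u).getLast?.getD ""]) ≠ [] := by simp
      rw [hd, hl, List.map_cons, List.cons_append,
        pvJoinConsNe _ _ _ hrest, ih ht, pvJoinTwo]
      apply String.toList_inj.mp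
      simp [String.toList_append]

-- segment-wise congruence of the final newline-join, under a fixed non-empty tail
theorem pvSegJoin {α : Type} (L : List α) (f g : α → List String) (tail : List String)
    (htail : tail ≠ [])
    (h : ∀ m ∈ L, (f m = [] ∧ g m = []) ∨
        (f m ≠ [] ∧ g m ≠ [] ∧ PySem.Str.join "\n" (f m) = PySem.Str.join "\n" (g m))) :
    PySem.Str.join "\n" (L.flatMap f ++ tail) = PySem.Str.join "\n" (L.flatMap g ++ tail) := by
  induction L with
  | nil => rfl
  | cons m Ls ih =>
    have ih' := ih (fun x hx => h x (by simp [hx]))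
    rcases h m (by simp) with ⟨hf, hg⟩ | ⟨hf, hg, hj⟩
    · simp [List.flatMap_cons, hf, hg, ih']
    · have hne : ∀ (F : α → List String), (Ls.flatMap F ++ tail) ≠ [] := by
        intro F hc
        rcases List.append_eq_nil_iff.mp hc with ⟨_, h2⟩
        exact htail h2
      rw [List.flatMap_cons, List.flatMap_cons, List.append_assoc, List.append_assoc,
        pvJoinApp _ _ _ hf (hne f), pvJoinApp _ _ _ hg (hne g), hj, ih']

theorem pvSegJoinPre {α : Type} (pre : List String) (L : List α) (f g : α → List String)
    (tail : List String) (htail : tail ≠ [])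
    (h : ∀ m ∈ L, (f m = [] ∧ g m = []) ∨
        (f m ≠ [] ∧ g m ≠ [] ∧ PySem.Str.join "\n" (f m) = PySem.Str.join "\n" (g m))) :
    PySem.Str.join "\n" (pre ++ (L.flatMap f ++ tail)) =
      PySem.Str.join "\n" (pre ++ (L.flatMap g ++ tail)) := by
  induction pre with
  | nil => simpa using pvSegJoin L f g tail htail h
  | cons p ps ih =>
    have hne : ∀ (F : α → List String), (ps ++ (L.flatMap F ++ tail)) ≠ [] := by
      intro F hc
      rcases List.append_eq_nil_iff.mp hc with ⟨_, h2⟩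
      rcases List.append_eq_nil_iff.mp h2 with ⟨_, h3⟩
      exact htail h3
    rw [List.cons_append, List.cons_append, pvJoinConsNe _ _ _ (hne f),
      pvJoinConsNe _ _ _ (hne g), ih]

-- ---- pass-1 / dict fusion ----
-- proof-side view of A's dict update on one classified statement
def pvUpd (d : PySem.Dict String (PySem.Set String)) (p : String × PySem.Set String) :
    PySem.Dict String (PySem.Set String) :=
  if d.contains p.1 then d.insert p.1 (PySem.Set.update (d.getD p.1 PySem.Set.empty) p.2)
  else d.insert p.1 p.2

lemma pvUpd_eq_insert (d : PySem.Dict String (PySem.Set String)) (p : String × PySem.Set String) :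
    pvUpd d p = d.insert p.1
      (if d.contains p.1 then PySem.Set.update (d.getD p.1 PySem.Set.empty) p.2 else p.2) := by
  unfold pvUpd; split_ifs <;> rfl

lemma keys_foldl_pvUpd (pairs : List (String × PySem.Set String))
    (d : PySem.Dict String (PySem.Set String)) :
    (pairs.foldl pvUpd d).keys = PySem.Set.update d.keys (pairs.map Prod.fst) := by
  rw [PySem.List.foldl_congr_mem pairs pvUpd
    (fun d p => d.insert p.1
      (if d.contains p.1 then PySem.Set.update (d.getD p.1 PySem.Set.empty) p.2 else p.2))
    d (fun acc x _ => pvUpd_eq_insert acc x)]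
  exact PySem.Dict.keys_foldl_insert_key pairs Prod.fst _ d

lemma mem_getD_foldl_pvUpd (pairs : List (String × PySem.Set String))
    (d : PySem.Dict String (PySem.Set String)) (m x : String) :
    x ∈ (pairs.foldl pvUpd d).getD m PySem.Set.empty ↔
      x ∈ d.getD m PySem.Set.empty ∨ ∃ p ∈ pairs, p.1 = m ∧ x ∈ p.2 := by
  induction pairs generalizing d with
  | nil => simp
  | cons p ps ih =>
    rw [List.foldl_cons, ih]
    have key : x ∈ (pvUpd d p).getD m PySem.Set.empty ↔
        x ∈ d.getD m PySem.Set.empty ∨ (p.1 = m ∧ x ∈ p.2) := by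
      by_cases hm : p.1 = m
      · subst hm
        rw [pvUpd_eq_insert, PySem.Dict.getD_insert_self]
        by_cases hc : d.contains p.1 = true
        · simp [hc, PySem.Set.mem_update]
        · have he : d.getD p.1 PySem.Set.empty = PySem.Set.empty :=
            PySem.Dict.getD_of_not_contains _ _ (by simpa using hc)
          rw [he]
          simp [hc, PySem.Set.empty]
      · rw [pvUpd_eq_insert, PySem.Dict.getD_insert_of_ne _ _ _ (Ne.symm hm)]
        simp [hm]
    rw [key]
    simp only [List.mem_cons]
    constructor
    · rintro (⟨h | ⟨h1, h2⟩⟩ | ⟨q, hq, h1, h2⟩)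
      · exact Or.inl h
      · exact Or.inr ⟨p, Or.inl rfl, h1, h2⟩
      · exact Or.inr ⟨q, Or.inr hq, h1, h2⟩
    · rintro (h | ⟨q, (rfl | hq), h1, h2⟩)
      · exact Or.inl (Or.inl h)
      · exact Or.inl (Or.inr ⟨h1, h2⟩)
      · exact Or.inr ⟨q, hq, h1, h2⟩

lemma nodup_getD_foldl_pvUpd (pairs : List (String × PySem.Set String))
    (d : PySem.Dict String (PySem.Set String))
    (hd : ∀ m, (d.getD m PySem.Set.empty).Nodup)
    (hp : ∀ p ∈ pairs, (p.2 : List String).Nodup) :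
    ∀ m, ((pairs.foldl pvUpd d).getD m PySem.Set.empty).Nodup := by
  induction pairs generalizing d with
  | nil => exact fun m => hd m
  | cons p ps ih =>
    intro m
    rw [List.foldl_cons]
    refine ih (pvUpd d p) (fun m' => ?_) (fun q hq => hp q (by simp [hq])) m
    by_cases hm : p.1 = m'
    · subst hm
      rw [pvUpd_eq_insert, PySem.Dict.getD_insert_self]
      split_ifs
      · exact PySem.Set.nodup_update _ _ (hd p.1)
      · exact hp p (by simp)
    · rw [pvUpd_eq_insert, PySem.Dict.getD_insert_of_ne _ _ _ (Ne.symm hm)]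
      exact hd m'

lemma nodup_pvItemsOf (s : String) : (pvItemsOf s : List String).Nodup := by
  simp only [pvItemsOf]
  split_ifs
  · simp [PySem.Set.empty]
  · exact PySem.Set.nodup_ofList _

lemma pvItemsEq (pairs : List (String × PySem.Set String))
    (hp : ∀ p ∈ pairs, (p.2 : List String).Nodup) (m : String) :
    PySem.List.sorted ((pairs.foldl pvUpd PySem.Dict.empty).getD m PySem.Set.empty) (fun x => x) =
      PySem.List.sorted (PySem.Set.ofList ((pairs.filter (fun p => p.1 == m)).flatMap Prod.snd))
        (fun x => x) := by
  apply PySem.List.sorted_eq_sorted_of_perm _ _ _ (fun a b h => h)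
  refine (List.perm_ext_iff_of_nodup ?_ ?_).mpr ?_
  · refine nodup_getD_foldl_pvUpd pairs _ (fun m' => ?_) hp m
    simp [PySem.Dict.getD_empty, PySem.Set.empty]
  · exact PySem.Set.nodup_ofList _
  · intro x
    rw [mem_getD_foldl_pvUpd]
    simp only [PySem.Set.mem_ofList, List.mem_flatMap, List.mem_filter,
      PySem.Dict.getD_empty, beq_iff_eq]
    constructor
    · rintro (h | ⟨p, hp1, hp2, hp3⟩)
      · simp [PySem.Set.empty] at h
      · exact ⟨p, ⟨hp1, hp2⟩, hp3⟩
    · rintro ⟨p, ⟨hp1, hp2⟩, hp3⟩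
      exact Or.inr ⟨p, hp1, hp2, hp3⟩

def pvPair (s : String) : String × PySem.Set String := (pvModuleOf s, pvItemsOf s)

lemma pvPass1Step_shift (bufo : Option (List String)) (s1 o1 : List String) (l : String) :
    pvPass1Step (bufo, s1, o1) l =
      ((pvPass1Step (bufo, [], []) l).1,
       s1 ++ (pvPass1Step (bufo, [], []) l).2.1,
       o1 ++ (pvPass1Step (bufo, [], []) l).2.2) := by
  cases bufo <;> simp only [pvPass1Step] <;> split_ifs <;> simp

lemma pvPass1_acc (lines : List String) (s1 o1 : List String) (bufo : Option (List String)) :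
    lines.foldl pvPass1Step (bufo, s1, o1) =
      ((lines.foldl pvPass1Step (bufo, [], [])).1,
       s1 ++ (lines.foldl pvPass1Step (bufo, [], [])).2.1,
       o1 ++ (lines.foldl pvPass1Step (bufo, [], [])).2.2) := by
  induction lines generalizing s1 o1 bufo with
  | nil => simp
  | cons l ls ih =>
    rcases hB : pvPass1Step (bufo, [], []) l with ⟨bB, sB, oB⟩
    simp only [List.foldl_cons, pvPass1Step_shift bufo s1 o1 l, hB]
    rw [ih (s1 ++ sB) (o1 ++ oB) bB, ih sB oB bB]
    simp

lemma pvStepA_single (buf : List String) (reg typ : PySem.Dict String (PySem.Set String))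
    (others : List String) (inML : Bool) (l : String)
    (hImp : PySem.Str.startswith (PySem.Str.strip l) "import " = true)
    (hBr : ¬ ((PySem.Str.isIn "{" l && !(PySem.Str.isIn "}" l)) = true)) :
    pvStepA (buf, reg, typ, others, inML) l =
      (buf, (if PySem.Str.isIn "type {" l then reg else pvUpd reg (pvPair l)),
       (if PySem.Str.isIn "type {" l then pvUpd typ (pvPair l) else typ), others, inML) := by
  simp only [pvStepA, pvUpd, pvPair, pvModuleOf, pvItemsOf, pvParseImports,
    hImp, if_true, hBr, if_false, Bool.false_eq_true]
  split_ifs <;> rfl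

lemma pvStepA_closeT (buf : List String) (reg typ : PySem.Dict String (PySem.Set String))
    (others : List String) (l : String)
    (hImp : ¬ (PySem.Str.startswith (PySem.Str.strip l) "import " = true))
    (hCl : PySem.Str.isIn "}" l = true)
    (hT : PySem.Str.isIn "type {" (PySem.Str.join "\n" (buf ++ [l])) = true) :
    pvStepA (buf, reg, typ, others, true) l =
      ([], reg, pvUpd typ (pvPair (PySem.Str.join "\n" (buf ++ [l]))), others, false) := by
  simp only [pvStepA, pvUpd, pvPair, pvModuleOf, pvItemsOf, pvParseImports,
    if_neg hImp, if_pos hCl, if_true, hT]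

lemma pvStepA_closeR (buf : List String) (reg typ : PySem.Dict String (PySem.Set String))
    (others : List String) (l : String)
    (hImp : ¬ (PySem.Str.startswith (PySem.Str.strip l) "import " = true))
    (hCl : PySem.Str.isIn "}" l = true)
    (hT : ¬ PySem.Str.isIn "type {" (PySem.Str.join "\n" (buf ++ [l])) = true) :
    pvStepA (buf, reg, typ, others, true) l =
      ([], pvUpd reg (pvPair (PySem.Str.join "\n" (buf ++ [l]))), typ, others, false) := by
  simp only [Bool.not_eq_true] at hT
  simp only [pvStepA, pvUpd, pvPair, pvModuleOf, pvItemsOf, pvParseImports,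
    if_neg hImp, if_pos hCl, if_true, hT, Bool.false_eq_true, if_false]

-- the statement-classifying folds applied to one more statement in front
lemma pvClassT (stmts : List String) (s : String) (d : PySem.Dict String (PySem.Set String))
    (h : PySem.Str.isIn "type {" s = true) :
    (((s :: stmts).filter (fun x => PySem.Str.isIn "type {" x)).map pvPair).foldl pvUpd d =
      ((stmts.filter (fun x => PySem.Str.isIn "type {" x)).map pvPair).foldl pvUpd
        (pvUpd d (pvPair s)) := by
  simp only [List.filter_cons, h]
  simp

lemma pvClassTskip (stmts : List String) (s : String) (d : PySem.Dict String (PySem.Set String))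
    (h : PySem.Str.isIn "type {" s = true) :
    (((s :: stmts).filter (fun x => !PySem.Str.isIn "type {" x)).map pvPair).foldl pvUpd d =
      ((stmts.filter (fun x => !PySem.Str.isIn "type {" x)).map pvPair).foldl pvUpd d := by
  simp only [List.filter_cons, h, Bool.not_true]
  simp

lemma pvClassR (stmts : List String) (s : String) (d : PySem.Dict String (PySem.Set String))
    (h : ¬ PySem.Str.isIn "type {" s = true) :
    (((s :: stmts).filter (fun x => !PySem.Str.isIn "type {" x)).map pvPair).foldl pvUpd d =
      ((stmts.filter (fun x => !PySem.Str.isIn "type {" x)).map pvPair).foldl pvUpd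
        (pvUpd d (pvPair s)) := by
  simp only [Bool.not_eq_true] at h
  simp only [List.filter_cons, h, Bool.not_false]
  simp

lemma pvClassRskip (stmts : List String) (s : String) (d : PySem.Dict String (PySem.Set String))
    (h : ¬ PySem.Str.isIn "type {" s = true) :
    (((s :: stmts).filter (fun x => PySem.Str.isIn "type {" x)).map pvPair).foldl pvUpd d =
      ((stmts.filter (fun x => PySem.Str.isIn "type {" x)).map pvPair).foldl pvUpd d := by
  simp only [Bool.not_eq_true] at h
  simp only [List.filter_cons, h]
  simp

lemma pvFusion (lines : List String) (reg typ : PySem.Dict String (PySem.Set String))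
    (others : List String) (bufo : Option (List String)) :
    lines.foldl pvStepA (bufo.getD [], reg, typ, others, bufo.isSome) =
      ((lines.foldl pvPass1Step (bufo, [], [])).1.getD [],
       ((((lines.foldl pvPass1Step (bufo, [], [])).2.1.filter
            (fun s => !PySem.Str.isIn "type {" s)).map pvPair).foldl pvUpd reg),
       ((((lines.foldl pvPass1Step (bufo, [], [])).2.1.filter
            (fun s => PySem.Str.isIn "type {" s)).map pvPair).foldl pvUpd typ),
       others ++ (lines.foldl pvPass1Step (bufo, [], [])).2.2,
       (lines.foldl pvPass1Step (bufo, [], [])).1.isSome) := by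
  induction lines generalizing reg typ others bufo with
  | nil => simp
  | cons l ls ih =>
    simp only [List.foldl_cons]
    by_cases hImp : PySem.Str.startswith (PySem.Str.strip l) "import " = true
    · by_cases hBr : (PySem.Str.isIn "{" l && !(PySem.Str.isIn "}" l)) = true
      · -- a multiline import starts: buffer replaced
        have hA : pvStepA (bufo.getD [], reg, typ, others, bufo.isSome) l
            = ([l], reg, typ, others, true) := by
          simp only [pvStepA, if_pos hImp, if_pos hBr]
        have hB : pvPass1Step (bufo, [], []) l = (some [l], [], []) := by
          cases bufo <;> simp only [pvPass1Step, if_pos hImp, if_pos hBr]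
        rw [hA, hB]
        have := ih reg typ others (some [l])
        simpa using this
      · -- a single-line import statement
        have hB : pvPass1Step (bufo, [], []) l = (bufo, [l], []) := by
          cases bufo <;> simp only [pvPass1Step, if_pos hImp, if_neg hBr, List.nil_append]
        rw [pvStepA_single _ _ _ _ _ _ hImp hBr, hB, pvPass1_acc ls [l] [] bufo]
        by_cases hT : PySem.Str.isIn "type {" l = true
        · rw [if_pos hT, if_pos hT]
          have := ih reg (pvUpd typ (pvPair l)) others bufo
          rw [this, List.singleton_append, pvClassT _ _ _ hT, pvClassTskip _ _ _ hT]
          simp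
        · rw [if_neg hT, if_neg hT]
          have := ih (pvUpd reg (pvPair l)) typ others bufo
          rw [this, List.singleton_append, pvClassR _ _ _ hT, pvClassRskip _ _ _ hT]
          simp
    · cases bufo with
      | some buf =>
        by_cases hCl : PySem.Str.isIn "}" l = true
        · -- the multiline import closes: one logical statement is complete
          have hB : pvPass1Step (some buf, [], []) l
              = (none, [PySem.Str.join "\n" (buf ++ [l])], []) := by
            simp only [pvPass1Step, if_neg hImp, if_pos hCl, List.nil_append]
          simp only [Option.getD_some, Option.isSome_some]
          by_cases hT : PySem.Str.isIn "type {" (PySem.Str.join "\n" (buf ++ [l])) = true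
          · rw [pvStepA_closeT _ _ _ _ _ hImp hCl hT, hB,
              pvPass1_acc ls [PySem.Str.join "\n" (buf ++ [l])] [] none]
            have := ih reg (pvUpd typ (pvPair (PySem.Str.join "\n" (buf ++ [l])))) others none
            simp only [Option.getD_none, Option.isSome_none] at this
            rw [this, List.singleton_append, pvClassT _ _ _ hT, pvClassTskip _ _ _ hT]
            simp
          · rw [pvStepA_closeR _ _ _ _ _ hImp hCl hT, hB,
              pvPass1_acc ls [PySem.Str.join "\n" (buf ++ [l])] [] none]
            have := ih (pvUpd reg (pvPair (PySem.Str.join "\n" (buf ++ [l])))) typ others none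
            simp only [Option.getD_none, Option.isSome_none] at this
            rw [this, List.singleton_append, pvClassR _ _ _ hT, pvClassRskip _ _ _ hT]
            simp
        · -- the buffer grows
          have hA : pvStepA ((some buf).getD [], reg, typ, others, (some buf).isSome) l
              = (buf ++ [l], reg, typ, others, true) := by
            simp only [pvStepA, if_neg hImp, if_neg hCl, Option.getD_some,
              Option.isSome_some, if_true]
          have hB : pvPass1Step (some buf, [], []) l = (some (buf ++ [l]), [], []) := by
            simp only [pvPass1Step, if_neg hImp, if_neg hCl]
          rw [hA, hB]
          have := ih reg typ others (some (buf ++ [l]))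
          simpa using this
      | none =>
        by_cases hNE : PySem.Str.strip l ≠ ""
        · -- an other (non-empty) line
          have hA : pvStepA ((none : Option (List String)).getD [], reg, typ, others, false) l
              = ([], reg, typ, others ++ [l], false) := by
            simp only [pvStepA, if_neg hImp, Bool.false_eq_true, if_false, if_pos hNE,
              Option.getD_none]
          have hB : pvPass1Step (none, [], []) l = (none, [], [l]) := by
            simp only [pvPass1Step, if_neg hImp, if_pos hNE, List.nil_append]
          simp only [Option.getD_none, Option.isSome_none] at *
          rw [hA, hB, pvPass1_acc ls [] [l] none]
          have := ih reg typ (others ++ [l]) none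
          simp only [Option.getD_none, Option.isSome_none] at this
          rw [this]
          simp
        · -- a blank line: state unchanged
          have hA : pvStepA ((none : Option (List String)).getD [], reg, typ, others, false) l
              = ([], reg, typ, others, false) := by
            simp only [pvStepA, if_neg hImp, Bool.false_eq_true, if_false, if_neg hNE,
              Option.getD_none]
          have hB : pvPass1Step (none, [], []) l = (none, [], []) := by
            simp only [pvPass1Step, if_neg hImp, if_neg hNE]
          simp only [Option.getD_none, Option.isSome_none] at *
          rw [hA, hB]
          have := ih reg typ others none
          simpa using this

-- ---- emission ----
-- A's per-module emitted lines, as a function of the sorted item list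
def pvLinesA (pfx mp : String) (items : List String) : List String :=
  if items.length = 1 then
    [pfx ++ " { " ++ (PySem.List.pyGet? items 0).getD "" ++ " } from '" ++ mp ++ "';"]
  else if items ≠ [] then
    [pfx ++ " {"] ++ (PySem.List.slice items none (some (-1))).map (fun item => "    " ++ item ++ ",")
      ++ ["    " ++ (PySem.List.pyGet? items (-1)).getD ""] ++ ["} from '" ++ mp ++ "';"]
  else []

lemma pvEmitAcc (pfx : String) (blocks : PySem.Dict String (PySem.Set String)) (acc : List String) :
    (PySem.List.sorted blocks.keys (fun x => x)).foldl (fun out mp =>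
        let items := PySem.List.sorted (blocks.getD mp PySem.Set.empty) (fun x => x)
        if items.length = 1 then
          out ++ [pfx ++ " { " ++ (PySem.List.pyGet? items 0).getD "" ++ " } from '" ++ mp ++ "';"]
        else if items ≠ [] then
          out ++ ([pfx ++ " {"]
            ++ (PySem.List.slice items none (some (-1))).map (fun item => "    " ++ item ++ ",")
            ++ ["    " ++ (PySem.List.pyGet? items (-1)).getD ""]
            ++ ["} from '" ++ mp ++ "';"])
        else out) acc
      = acc ++ (PySem.List.sorted blocks.keys (fun x => x)).flatMap
          (fun mp => pvLinesA pfx mp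
            (PySem.List.sorted (blocks.getD mp PySem.Set.empty) (fun x => x))) := by
  rw [PySem.List.foldl_congr_mem _ _
    (fun out mp => out ++ pvLinesA pfx mp
      (PySem.List.sorted (blocks.getD mp PySem.Set.empty) (fun x => x))) acc
    (by intro a mp _; simp only [pvLinesA]; split_ifs <;> simp)]
  exact PySem.List.foldl_append_eq_flatMap _ _ _

lemma pvEmitRegAcc (blocks : PySem.Dict String (PySem.Set String)) (acc : List String) :
    (PySem.List.sorted blocks.keys (fun x => x)).foldl (fun acc mp =>
        let items := PySem.List.sorted (blocks.getD mp PySem.Set.empty) (fun x => x)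
        if items.length = 1 then
          acc ++ ["import { " ++ (PySem.List.pyGet? items 0).getD "" ++ " } from '" ++ mp ++ "';"]
        else if items ≠ [] then
          acc ++ (["import {"]
            ++ (PySem.List.slice items none (some (-1))).map (fun item => "    " ++ item ++ ",")
            ++ ["    " ++ (PySem.List.pyGet? items (-1)).getD ""]
            ++ ["} from '" ++ mp ++ "';"])
        else acc) acc
      = acc ++ (PySem.List.sorted blocks.keys (fun x => x)).flatMap
          (fun mp => pvLinesA "import" mp
            (PySem.List.sorted (blocks.getD mp PySem.Set.empty) (fun x => x))) :=
  pvEmitAcc "import" blocks acc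

lemma pvEmitTypAcc (blocks : PySem.Dict String (PySem.Set String)) (acc : List String) :
    (PySem.List.sorted blocks.keys (fun x => x)).foldl (fun acc mp =>
        let items := PySem.List.sorted (blocks.getD mp PySem.Set.empty) (fun x => x)
        if items.length = 1 then
          acc ++ ["import type { " ++ (PySem.List.pyGet? items 0).getD "" ++ " } from '" ++ mp ++ "';"]
        else if items ≠ [] then
          acc ++ (["import type {"]
            ++ (PySem.List.slice items none (some (-1))).map (fun item => "    " ++ item ++ ",")
            ++ ["    " ++ (PySem.List.pyGet? items (-1)).getD ""]
            ++ ["} from '" ++ mp ++ "';"])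
        else acc) acc
      = acc ++ (PySem.List.sorted blocks.keys (fun x => x)).flatMap
          (fun mp => pvLinesA "import type" mp
            (PySem.List.sorted (blocks.getD mp PySem.Set.empty) (fun x => x))) :=
  pvEmitAcc "import type" blocks acc

-- A's line list for a module and B's one-string block have the same newline-join
lemma pvRenderJoin (pfx mp : String) (items : List String) :
    (pvLinesA pfx mp items = [] ∧ pvRender pfx mp items = []) ∨
    (pvLinesA pfx mp items ≠ [] ∧ pvRender pfx mp items ≠ [] ∧
      PySem.Str.join "\n" (pvLinesA pfx mp items) = PySem.Str.join "\n" (pvRender pfx mp items)) := by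
  by_cases h0 : items = []
  · left
    subst h0
    simp [pvLinesA, pvRender]
  · right
    by_cases h1 : items.length = 1
    · have hL : pvLinesA pfx mp items =
          [pfx ++ " { " ++ (PySem.List.pyGet? items 0).getD "" ++ " } from '" ++ mp ++ "';"] := by
        simp [pvLinesA, h1]
      have hR : pvRender pfx mp items =
          [pfx ++ " { " ++ (PySem.List.pyGet? items 0).getD "" ++ " } from '" ++ mp ++ "';"] := by
        simp [pvRender, h0, h1]
      exact ⟨by simp [hL], by simp [hR], by rw [hL, hR]⟩
    · have hL : pvLinesA pfx mp items =
          [pfx ++ " {"] ++ (((PySem.List.slice items none (some (-1))).map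
              (fun item => "    " ++ item ++ ",")
            ++ ["    " ++ (PySem.List.pyGet? items (-1)).getD ""]) ++ ["} from '" ++ mp ++ "';"]) := by
        simp [pvLinesA, h1, h0, List.append_assoc]
      have hR : pvRender pfx mp items =
          [pfx ++ " {\n    " ++ PySem.Str.join ",\n    " items ++ "\n} from '" ++ mp ++ "';"] := by
        simp [pvRender, h0, h1]
      refine ⟨by simp [hL], by simp [hR], ?_⟩
      rw [hL, hR, pvJoinOne, List.singleton_append,
        pvJoinConsNe _ _ _ (by simp),
        pvJoinApp _ _ _ (by simp) (by simp),
        pvLemJ items h0, pvJoinOne]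
      apply String.toList_inj.mp
      simp [String.toList_append]

lemma pvKeysSorted (pairs : List (String × PySem.Set String)) :
    PySem.List.sorted ((pairs.foldl pvUpd PySem.Dict.empty).keys) (fun x => x) =
      PySem.List.sorted (PySem.Set.ofList (pairs.map Prod.fst)) (fun x => x) := by
  rw [keys_foldl_pvUpd, PySem.Dict.keys_empty, PySem.Set.update_nil_left]

lemma pvNodupPairs (stmts : List String) :
    ∀ p ∈ stmts.map pvPair, (p.2 : List String).Nodup := by
  rintro p hp
  rcases List.mem_map.mp hp with ⟨t, _, rfl⟩
  exact nodup_pvItemsOf t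

-- per-module condition feeding the segment-wise join congruence
lemma pvCond (pfx : String) (stmts : List String) (m : String) :
    (pvLinesA pfx m (PySem.List.sorted
        (((stmts.map pvPair).foldl pvUpd PySem.Dict.empty).getD m PySem.Set.empty) (fun x => x)) = [] ∧
      pvRender pfx m (PySem.List.sorted (PySem.Set.ofList
        (((stmts.map pvPair).filter (fun p => p.1 == m)).flatMap Prod.snd)) (fun x => x)) = []) ∨
    (pvLinesA pfx m (PySem.List.sorted
        (((stmts.map pvPair).foldl pvUpd PySem.Dict.empty).getD m PySem.Set.empty) (fun x => x)) ≠ [] ∧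
      pvRender pfx m (PySem.List.sorted (PySem.Set.ofList
        (((stmts.map pvPair).filter (fun p => p.1 == m)).flatMap Prod.snd)) (fun x => x)) ≠ [] ∧
      PySem.Str.join "\n" (pvLinesA pfx m (PySem.List.sorted
        (((stmts.map pvPair).foldl pvUpd PySem.Dict.empty).getD m PySem.Set.empty) (fun x => x))) =
      PySem.Str.join "\n" (pvRender pfx m (PySem.List.sorted (PySem.Set.ofList
        (((stmts.map pvPair).filter (fun p => p.1 == m)).flatMap Prod.snd)) (fun x => x)))) := by
  rw [pvItemsEq _ (pvNodupPairs stmts) m]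
  exact pvRenderJoin pfx m _

lemma pvFinal (SMr SMt : List String) (fr gr ft gt : String → List String) (others : List String)
    (hr : ∀ m ∈ SMr, (fr m = [] ∧ gr m = []) ∨
        (fr m ≠ [] ∧ gr m ≠ [] ∧ PySem.Str.join "\n" (fr m) = PySem.Str.join "\n" (gr m)))
    (ht : ∀ m ∈ SMt, (ft m = [] ∧ gt m = []) ∨
        (ft m ≠ [] ∧ gt m ≠ [] ∧ PySem.Str.join "\n" (ft m) = PySem.Str.join "\n" (gt m))) :
    PySem.Str.strip (PySem.Str.join "\n" (SMr.flatMap fr ++ SMt.flatMap ft ++ [""] ++ others)) =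
      PySem.Str.strip (PySem.Str.join "\n" (SMr.flatMap gr ++ SMt.flatMap gt ++ [""] ++ others)) := by
  have htail : (([""] ++ others : List String)) ≠ [] := by simp
  congr 1
  rw [List.append_assoc, List.append_assoc, List.append_assoc, List.append_assoc,
    pvSegJoinPre (SMr.flatMap fr) SMt ft gt ([""] ++ others) htail ht]
  have hne : (SMt.flatMap gt ++ ([""] ++ others)) ≠ [] := by
    intro hc
    rcases List.append_eq_nil_iff.mp hc with ⟨_, h2⟩
    exact htail h2
  rw [pvSegJoin SMr fr gr _ hne hr]

theorem clean_typescript_spec : Claim_equal_clean_typescript := by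
  intro content _
  show clean_typescript content = clean_typescript_alt content
  simp only [clean_typescript, clean_typescript_alt]
  generalize (PySem.Str.splitlines content).map
    (fun line => pvRstripCRLF (PySem.Str.stripChars line "\ufeff")) = L
  have hmap : (fun s => (pvModuleOf s, pvItemsOf s)) = pvPair := rfl
  have hF := pvFusion L PySem.Dict.empty PySem.Dict.empty [] none
  simp only [Option.getD_none, Option.isSome_none, List.nil_append] at hF
  rw [hF]
  dsimp only
  generalize (List.foldl pvPass1Step (none, [], []) L).2.1 = stmts
  generalize (List.foldl pvPass1Step (none, [], []) L).2.2 = others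
  simp only [pvEmitRegAcc, pvEmitTypAcc, List.nil_append]
  simp only [pvKeysSorted, pvGroup, hmap, List.flatMap_map]
  exact pvFinal _ _ _ _ _ _ _
    (fun m _ => pvCond "import" (stmts.filter (fun s => !PySem.Str.isIn "type {" s)) m)
    (fun m _ => pvCond "import type" (stmts.filter (fun s => PySem.Str.isIn "type {" s)) m)
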